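-- pv_equiv track=rewrite | github.com/gimseongyeon545/Contest | Finance/Dacon_Finance (2)/Dacon_Finance2/train.py | merge_blocks_maxlen
-- ===== SOURCE A (Python) =====
-- def merge_blocks_maxlen(dicts):
--     out = {}
--     for d in dicts:
--         if not isinstance(d, dict): continue
--         for k, v in d.items():
--             if not isinstance(v, str): continue
--             if k not in out or len(out[k]) < len(v):
--                 out[k] = v
--     return out
-- ===== SOURCE B (Python) =====
-- def merge_blocks_maxlen(dicts):
--     # Phase 1: group all string values by key, preserving first-encounter order.
--     groups = {}
--     for d in dicts:
--         if not isinstance(d, dict):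
--             continue
--         for k, v in d.items():
--             if not isinstance(v, str):
--                 continue
--             groups.setdefault(k, []).append(v)
--     # Phase 2: per key, keep the first value of maximal length (max is first-wins).
--     return {k: max(vs, key=len) for k, vs in groups.items()}
-- ===== Notes on version B (the rewrite author's own statement) =====
-- stated objective: alternative
-- what changed: B replaces A's single-pass dict that overwrites on strictly-longer values with a two-phase decomposition: first group all string values per key into lists in encounter order, then take max(vs, key=len) (first-wins) per group.
import Mathlib
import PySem

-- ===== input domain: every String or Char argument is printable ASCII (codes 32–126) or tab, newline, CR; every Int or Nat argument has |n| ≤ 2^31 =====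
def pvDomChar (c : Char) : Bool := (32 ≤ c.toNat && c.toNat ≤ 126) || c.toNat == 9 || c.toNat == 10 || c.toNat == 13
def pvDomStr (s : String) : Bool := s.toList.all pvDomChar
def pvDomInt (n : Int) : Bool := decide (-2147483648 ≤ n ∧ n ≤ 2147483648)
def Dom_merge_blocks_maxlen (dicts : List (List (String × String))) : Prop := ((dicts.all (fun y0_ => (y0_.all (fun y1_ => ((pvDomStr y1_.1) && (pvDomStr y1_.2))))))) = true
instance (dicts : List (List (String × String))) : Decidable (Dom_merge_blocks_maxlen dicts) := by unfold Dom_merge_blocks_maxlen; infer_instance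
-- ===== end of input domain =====

-- B replaces A's longest-so-far dict update with group-by-key then first max-by-length per key
-- (objective: alternative decomposition; same asymptotic cost).
-- Under the type convention every d is a dict and every v a str, so A's isinstance guards are always true
-- and are not ported.

-- ===== PORT A =====
-- out[k] = v exactly when k is new or the stored value is strictly shorter.
def merge_blocks_maxlen (dicts : List (List (String × String))) : List (String × String) :=
  (dicts.foldl (fun out d =>
      d.foldl (fun out kv =>
        if out.contains kv.1 = false ∨ PySem.Str.len (out.getD kv.1 "") < PySem.Str.len kv.2
        then out.insert kv.1 kv.2 else out) out)
    PySem.Dict.empty).items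

-- ===== PORT B =====
-- groups.setdefault(k, []).append(v) computes groups[k] = groups.get(k, []) + [v], i.e. Dict.modify.
-- max(vs, key=len) is PySem.List.maxD (first maximal wins); vs is never empty, so the default is never read.
def merge_blocks_maxlen_alt (dicts : List (List (String × String))) : List (String × String) :=
  let groups : PySem.Dict String (List String) :=
    dicts.foldl (fun g d =>
      d.foldl (fun g kv => g.modify kv.1 [] (· ++ [kv.2])) g) PySem.Dict.empty
  groups.items.map (fun p => (p.1, PySem.List.maxD p.2 PySem.Str.len ""))

-- ===== PRECONDITION & SPEC =====
def Spec_merge_blocks_maxlen (dicts : List (List (String × String))) (out : List (String × String)) : Prop := out = merge_blocks_maxlen_alt dicts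
instance (dicts : List (List (String × String))) (out : List (String × String)) : Decidable (Spec_merge_blocks_maxlen dicts out) := by unfold Spec_merge_blocks_maxlen; infer_instance

-- ===== CLAIM (what is proved, stated in full; the proofs are below) =====
def Claim_equal_merge_blocks_maxlen : Prop := ∀ (dicts : List (List (String × String))), Dom_merge_blocks_maxlen dicts → Spec_merge_blocks_maxlen dicts (merge_blocks_maxlen dicts)

-- ===== LEMMAS AND PROOFS =====

-- the per-key reduction B applies to a group
def pvBest (vs : List String) : String := PySem.List.maxD vs PySem.Str.len ""

lemma pvBest_append (vs : List String) (v : String) (hvs : vs ≠ []) :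
    pvBest (vs ++ [v]) =
      if PySem.Str.len (pvBest vs) < PySem.Str.len v then v else pvBest vs := by
  have h : PySem.List.max? vs PySem.Str.len ≠ none := by
    simpa [PySem.List.max?_eq_none_iff] using hvs
  obtain ⟨m, hm⟩ := Option.ne_none_iff_exists'.mp h
  simp [pvBest, PySem.List.maxD, PySem.List.max?, List.foldl_append] at hm ⊢
  rw [hm]
  split_ifs with h1
  · simp_all
  · have h2 : ¬ m.length < v.length := by simpa using h1
    simp [h2]

-- two items of a nodup-keyed dict with the same key are equal
lemma pvItem_eq {g : PySem.Dict String (List String)} (hnd : g.keys.Nodup)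
    {p : String × List String} {k : String} {vs : List String}
    (hp : p ∈ g.items) (hv : (k, vs) ∈ g.items) (hk : p.1 = k) : p = (k, vs) := by
  have h1 : g.get? p.1 = some p.2 := PySem.Dict.get?_of_mem_items g (by simpa using hp) hnd
  have h2 : g.get? k = some vs := PySem.Dict.get?_of_mem_items g hv hnd
  rw [hk] at h1
  have : p.2 = vs := by rw [h1] at h2; exact Option.some.inj h2
  exact Prod.ext hk this

-- loop invariant: A's dict is the image of B's group dict under (k, vs) ↦ (k, pvBest vs)
lemma pvMerge_inv (ps : List (String × String)) (d : PySem.Dict String String)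
    (g : PySem.Dict String (List String))
    (hnd : g.keys.Nodup)
    (hne : ∀ p ∈ g.items, p.2 ≠ [])
    (h : d.items = g.items.map (fun p => (p.1, pvBest p.2))) :
    (ps.foldl (fun out kv =>
        if out.contains kv.1 = false ∨ PySem.Str.len (out.getD kv.1 "") < PySem.Str.len kv.2
        then out.insert kv.1 kv.2 else out) d).items
    = (ps.foldl (fun g kv => g.modify kv.1 [] (· ++ [kv.2])) g).items.map
        (fun p => (p.1, pvBest p.2)) := by
  induction ps generalizing d g with
  | nil => simpa using h
  | cons kv ps ih =>
    obtain ⟨k, v⟩ := kv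
    have hkeys : d.keys = g.keys := by
      simp only [PySem.Dict.keys, h, List.map_map]; rfl
    have hcont : d.contains k = g.contains k := by
      simp [PySem.Dict.contains_eq_decide_mem_keys, hkeys]
    simp only [List.foldl_cons]
    by_cases hc : g.contains k = true
    · -- key already present: g appends to the group, A updates iff strictly longer
      obtain ⟨vs, hvs⟩ : ∃ vs, g.get? k = some vs := by
        have := PySem.Dict.contains_eq_isSome_get? g k
        rw [hc] at this
        exact Option.isSome_iff_exists.mp this.symm
      have hmem : (k, vs) ∈ g.items := PySem.Dict.mem_items_of_get?_eq_some g hvs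
      have hgD : g.getD k [] = vs := PySem.Dict.getD_of_get?_eq_some g [] hvs
      have hvs_ne : vs ≠ [] := hne _ hmem
      have hdmem : (k, pvBest vs) ∈ d.items := by
        rw [h]; exact List.mem_map.mpr ⟨(k, vs), hmem, rfl⟩
      have hdnd : d.keys.Nodup := by rw [hkeys]; exact hnd
      have hdD : d.getD k "" = pvBest vs :=
        PySem.Dict.getD_of_mem_items d hdmem hdnd ""
      have hmod : (g.modify k [] (· ++ [v])) = g.insert k (vs ++ [v]) := by
        simp [PySem.Dict.modify, hgD]
      have hgi : (g.insert k (vs ++ [v])).items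
          = g.items.map (fun p => if p.1 == k then (k, vs ++ [v]) else p) :=
        PySem.Dict.items_insert_of_contains g _ hc
      have hnd' : (g.modify k [] (· ++ [v])).keys.Nodup := by
        rw [hmod]
        exact PySem.Dict.nodup_keys_insert g k _ hnd
      have hne' : ∀ p ∈ (g.modify k [] (· ++ [v])).items, p.2 ≠ [] := by
        rw [hmod, hgi]
        intro p hp
        obtain ⟨q, hq, hqe⟩ := List.mem_map.mp hp
        subst hqe
        split_ifs with hk
        · simp
        · exact hne _ hq
      apply ih _ _ hnd' hne'
      rw [hmod, hgi, List.map_map]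
      by_cases hlt : PySem.Str.len (d.getD k "") < PySem.Str.len v
      · -- strictly longer: A overwrites; the new group's best is v
        rw [if_pos (Or.inr hlt)]
        have hcd : d.contains k = true := by rw [hcont]; exact hc
        rw [PySem.Dict.items_insert_of_contains d v hcd, h, List.map_map]
        apply List.map_congr_left
        intro p hp
        by_cases hk : p.1 = k
        · have hpe : p = (k, vs) := pvItem_eq hnd hp hmem hk
          subst hpe
          have : pvBest (vs ++ [v]) = v := by
            rw [pvBest_append vs v hvs_ne, if_pos (by rwa [hdD] at hlt)]
          simp [this]
        · simp [Function.comp, hk]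
      · -- not strictly longer: A keeps its value; the group's best is unchanged
        rw [if_neg (by
          push Not
          exact ⟨by simp [hcont, hc], le_of_not_gt hlt⟩)]
        rw [h]
        apply List.map_congr_left
        intro p hp
        by_cases hk : p.1 = k
        · have hpe : p = (k, vs) := pvItem_eq hnd hp hmem hk
          subst hpe
          have : pvBest (vs ++ [v]) = pvBest vs := by
            rw [pvBest_append vs v hvs_ne, if_neg (by rwa [hdD] at hlt)]
          simp [this]
        · simp [Function.comp, hk]
    · -- fresh key: both dicts append a new entry
      have hc' : g.contains k = false := by simpa using hc
      have hcd : d.contains k = false := by rw [hcont]; exact hc'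
      have hgD : g.getD k [] = [] := PySem.Dict.getD_of_not_contains g [] hc'
      have hmod : (g.modify k [] (· ++ [v])) = g.insert k [v] := by
        simp [PySem.Dict.modify, hgD]
      have hgi : (g.insert k [v]).items = g.items ++ [(k, [v])] :=
        PySem.Dict.items_insert_of_not_contains g _ hc'
      have hnd' : (g.modify k [] (· ++ [v])).keys.Nodup := by
        rw [hmod]; exact PySem.Dict.nodup_keys_insert g k _ hnd
      have hne' : ∀ p ∈ (g.modify k [] (· ++ [v])).items, p.2 ≠ [] := by
        rw [hmod, hgi]
        intro p hp
        rcases List.mem_append.mp hp with hp | hp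
        · exact hne _ hp
        · simp at hp; subst hp; simp
      rw [if_pos (Or.inl hcd)]
      apply ih _ _ hnd' hne'
      rw [hmod, hgi, PySem.Dict.items_insert_of_not_contains d v hcd, h, List.map_append]
      simp [pvBest, PySem.List.maxD, PySem.List.max?]

-- ===== VERDICT (by name: the statement is the Claim_ definition above) =====
theorem merge_blocks_maxlen_spec : Claim_equal_merge_blocks_maxlen := by
  intro dicts _
  show merge_blocks_maxlen dicts = merge_blocks_maxlen_alt dicts
  unfold merge_blocks_maxlen merge_blocks_maxlen_alt
  rw [← List.foldl_flatten, ← List.foldl_flatten]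
  exact pvMerge_inv dicts.flatten PySem.Dict.empty PySem.Dict.empty
    (by simp [PySem.Dict.empty, PySem.Dict.keys]) (by simp [PySem.Dict.empty]) (by simp [PySem.Dict.empty])
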